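-- pv_equiv track=rewrite | github.com/herenti/chatango | search.py | whois
-- ===== SOURCE A (Python) =====
-- uids = {'23393105': ['te4','te5'],'26419005': ['te3','te4'],'23983780': ['te2','te3'],'23390465': ['te2','te1'],'23386205': ['voxela','muse','te1'], '34166780': ['slug', 'muse', 'pixie', 'cunn', 'zombie', 'opal', 'virgo', 'charm', 'skann', 'feline', 'crush', 'rune', 'ejae', 'squirtle', 'succubi', 'hex', 'halo', 'horo'], '86298963': ['xxkaringtonxx'], '56157642': ['h'], '98904156': ['kenyan'], '48833405': ['atticus'], '85707971': ['agentpaper'], '66931466': ['sapphire', 'hershey'], '87888214': ['thorasic'], '10917657': ['lethebot'], '62797501': ['asriel'], '88081233': ['trav', 'trantran122', 'tasty', 't', 'raccoon', 'tea'], '11136664': ['jessicanigrifanclub', 'courtney'], '16631726': ['heartbeat'], '27002630': ['ainzsyn']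
--     }
--
-- def _whois(string):
--     a = []
--     for i in uids:
--         i = uids[i]
--         if string in i:
--             a += i
--     return list(set(a))
--
-- def whois(string):
--     a = [string]
--     while True:
--         l = len(a)
--         for n in a:
--             i = _whois(n)
--             if len(i) > 0: a += i
--             else: a = ['no accounts for that user']; break
--             a = list(set(a))
--         if l == len(a):
--             break
--     return sorted(a)
-- ===== SOURCE B (Python) =====
-- uids = {'23393105': ['te4','te5'],'26419005': ['te3','te4'],'23983780': ['te2','te3'],'23390465': ['te2','te1'],'23386205': ['voxela','muse','te1'], '34166780': ['slug', 'muse', 'pixie', 'cunn', 'zombie', 'opal', 'virgo', 'charm', 'skann', 'feline', 'crush', 'rune', 'ejae', 'squirtle', 'succubi', 'hex', 'halo', 'horo'], '86298963': ['xxkaringtonxx'], '56157642': ['h'], '98904156': ['kenyan'], '48833405': ['atticus'], '85707971': ['agentpaper'], '66931466': ['sapphire', 'hershey'], '87888214': ['thorasic'], '10917657': ['lethebot'], '62797501': ['asriel'], '88081233': ['trav', 'trantran122', 'tasty', 't', 'raccoon', 'tea'], '11136664': ['jessicanigrifanclub', 'courtney'], '16631726': ['heartbeat'], '27002630': ['a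inzsyn']
--     }
--
-- def whois(string):
--     # Index each username by the groups it belongs to, then DFS the
--     # connected component of `string` once.
--     groups_of = {}
--     for members in uids.values():
--         for name in members:
--             groups_of.setdefault(name, []).append(members)
--     if string not in groups_of:
--         return ['no accounts for that user']
--     visited = {string}
--     stack = [string]
--     while stack:
--         n = stack.pop()
--         for g in groups_of[n]:
--             for m in g:
--                 if m not in visited:
--                     visited.add(m)
--                     stack.append(m)
--     return sorted(visited)
-- ===== Notes on version B (the rewrite author's own statement) =====
-- stated objective: simpler
-- what changed: A repeatedly rescans the whole accumulated list against every uid group until a fixpoint; B builds a username->groups index in one pass and does a single DFS of the connected component, sorting the visited set once.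
import Mathlib
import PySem

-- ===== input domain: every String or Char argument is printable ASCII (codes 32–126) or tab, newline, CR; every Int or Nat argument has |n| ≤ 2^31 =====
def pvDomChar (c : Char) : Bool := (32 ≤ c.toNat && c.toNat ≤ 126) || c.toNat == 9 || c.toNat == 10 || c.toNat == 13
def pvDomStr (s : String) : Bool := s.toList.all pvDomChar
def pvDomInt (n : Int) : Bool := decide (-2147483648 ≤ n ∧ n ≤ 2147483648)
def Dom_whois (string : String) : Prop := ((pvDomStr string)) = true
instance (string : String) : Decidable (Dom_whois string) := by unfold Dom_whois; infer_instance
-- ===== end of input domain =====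

-- B replaces A's repeated whole-list re-scanning fixpoint loop by a one-pass
-- group index plus a DFS of the connected component (objective: simpler).

-- ===== PORT A =====
def uids : PySem.Dict String (List String) := PySem.Dict.ofList
  [("23393105", ["te4","te5"]), ("26419005", ["te3","te4"]), ("23983780", ["te2","te3"]),
   ("23390465", ["te2","te1"]), ("23386205", ["voxela","muse","te1"]),
   ("34166780", ["slug","muse","pixie","cunn","zombie","opal","virgo","charm","skann","feline","crush","rune","ejae","squirtle","succubi","hex","halo","horo"]),
   ("86298963", ["xxkaringtonxx"]), ("56157642", ["h"]), ("98904156", ["kenyan"]),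
   ("48833405", ["atticus"]), ("85707971", ["agentpaper"]), ("66931466", ["sapphire","hershey"]),
   ("87888214", ["thorasic"]), ("10917657", ["lethebot"]), ("62797501", ["asriel"]),
   ("88081233", ["trav","trantran122","tasty","t","raccoon","tea"]),
   ("11136664", ["jessicanigrifanclub","courtney"]), ("16631726", ["heartbeat"]),
   ("27002630", ["ainzsyn"])]

-- _whois: `for i in uids: i = uids[i]` — fold over the keys, looking each up
-- (the lookup cannot fail: k comes from uids itself, so `.getD []` is never taken).
def whoisHelper (string : String) : List String :=
  PySem.Set.ofList ((PySem.Dict.keys uids).foldl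
    (fun a k => let i := (PySem.Dict.get? uids k).getD []; if string ∈ i then a ++ i else a) [])

-- the remaining iterations of `for n in a` after the first: Python's iterator walks the
-- ORIGINAL list object (extended in place only by the FIRST `a += i`; the rebinding
-- `a = list(set(a))` detaches `a` from it); acc is the current (rebound) `a`.
def whoisForRest : List String → List String → Option (List String)
  | [], acc => some acc
  | n :: rest, acc =>
    let i := whoisHelper n
    if 0 < i.length then whoisForRest rest (PySem.Set.ofList (acc ++ i))
    else none    -- break, with a = ['no accounts for that user']

-- one full `for n in a` pass; none = the break branch was taken
def whoisFor (a : List String) : Option (List String) :=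
  match a with
  | [] => some a
  | n :: _ =>
    let i := whoisHelper n
    if 0 < i.length then whoisForRest ((a ++ i).drop 1) (PySem.Set.ofList (a ++ i))
    else none

-- `while True` with fuel: each round either stops or adds ≥ 1 of the 44 usernames,
-- so fuel 64 is never exhausted (the fuel-0 value has the same `sorted a` shape).
-- Python's sorted(list-of-str) compares strings pointwise by code point, which is the
-- lexicographic order on their character lists: key `s.toList` (String's own `<` is
-- the same order but is not kernel-reducible).
def whoisLoop : Nat → List String → List String
  | 0, a => PySem.List.sorted a (fun s => s.toList) false
  | fuel + 1, a =>
    let l := a.length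
    match whoisFor a with
    | none =>
      let a' := ["no accounts for that user"]
      if l == a'.length then PySem.List.sorted a' (fun s => s.toList) false
      else whoisLoop fuel a'
    | some a' =>
      if l == a'.length then PySem.List.sorted a' (fun s => s.toList) false
      else whoisLoop fuel a'

-- NOTE on `list(set(a))`: the returned value is sorted and the SET the loop reaches is
-- the same for every iteration order, so the result does not depend on Python's hash
-- order; the port uses first-insertion order (PySem.Set.ofList).
def whois (string : String) : List String := whoisLoop 64 [string]

-- ===== PORT B =====
-- groups_of: username -> list of the uid groups containing it (Source B's setdefault/append loop)
def groupsOf : PySem.Dict String (List (List String)) :=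
  (PySem.Dict.values uids).foldl
    (fun d members => members.foldl
      (fun d name => PySem.Dict.modify d name [] (fun gs => gs ++ [members])) d)
    PySem.Dict.empty

-- DFS: pop the stack's last element, push the unvisited members of its groups
-- (fuel: every name is pushed at most once, so 128 rounds are never exhausted).
def whoisDfs : Nat → List String → PySem.Set String → PySem.Set String
  | 0, _, visited => visited
  | fuel + 1, stack, visited =>
    match stack.getLast? with
    | none => visited
    | some n =>
      let stack' := stack.dropLast
      let sv := (PySem.Dict.getD groupsOf n []).foldl
        (fun (sv : List String × PySem.Set String) g =>
          g.foldl (fun sv m =>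
            if m ∈ sv.2 then sv else (sv.1 ++ [m], PySem.Set.add sv.2 m)) sv)
        (stack', visited)
      whoisDfs fuel sv.1 sv.2

def whois_alt (string : String) : List String :=
  if PySem.Dict.contains groupsOf string then
    PySem.List.sorted (whoisDfs 128 [string] (PySem.Set.add PySem.Set.empty string))
      (fun s => s.toList) false
  else ["no accounts for that user"]

-- ===== PRECONDITION & SPEC =====
def Spec_whois (string : String) (out : List String) : Prop := out = whois_alt string
instance (string : String) (out : List String) : Decidable (Spec_whois string out) := by unfold Spec_whois; infer_instance

-- ===== CLAIM (what is proved, stated in full; the proofs are below) =====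
def Claim_equal_whois : Prop := ∀ (string : String), Dom_whois string → Spec_whois string (whois string)

-- ===== LEMMAS AND PROOFS =====

-- every username occurring in uids, in first-occurrence order
def uidNames : List String :=
  ["te4","te5","te3","te2","te1","voxela","muse",
   "slug","pixie","cunn","zombie","opal","virgo","charm","skann","feline","crush","rune","ejae","squirtle","succubi","hex","halo","horo",
   "xxkaringtonxx","h","kenyan","atticus","agentpaper","sapphire","hershey","thorasic","lethebot","asriel",
   "trav","trantran122","tasty","t","raccoon","tea","jessicanigrifanclub","courtney","heartbeat","ainzsyn"]

-- on the 44 usernames both programs are closed terms: evaluate them all once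
set_option maxRecDepth 1000000 in
theorem whois_eq_on_uidNames : ∀ s ∈ uidNames, whois s = whois_alt s := by
  have h : uidNames.all (fun s => whois s == whois_alt s) = true := by decide
  intro s hs
  simpa using List.all_eq_true.mp h s hs

-- a string in no uid group collects nothing in _whois
theorem whoisHelper_nil (s : String) (h : s ∉ uidNames) : whoisHelper s = [] := by
  have hsub : ∀ k ∈ PySem.Dict.keys uids,
      ∀ x ∈ (PySem.Dict.get? uids k).getD [], x ∈ uidNames := by decide
  have hfold : ∀ (ks : List String),
      (∀ k ∈ ks, ∀ x ∈ (PySem.Dict.get? uids k).getD [], x ∈ uidNames) →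
      ∀ (acc : List String),
      ks.foldl (fun a k => let i := (PySem.Dict.get? uids k).getD [];
                           if s ∈ i then a ++ i else a) acc = acc := by
    intro ks
    induction ks with
    | nil => intro _ acc; rfl
    | cons k ks ih =>
      intro hk acc
      have hcond : ¬ s ∈ (PySem.Dict.get? uids k).getD [] :=
        fun hm => h (hk k List.mem_cons_self s hm)
      simp only [List.foldl_cons]
      have hstep : (let i := (PySem.Dict.get? uids k).getD [];
                    if s ∈ i then acc ++ i else acc) = acc := if_neg hcond
      rw [hstep]
      exact ih (fun k' hk' => hk k' (List.mem_cons_of_mem _ hk')) acc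
  unfold whoisHelper
  rw [hfold _ hsub []]
  rfl

set_option maxRecDepth 100000 in
theorem whois_notin (s : String) (h : s ∉ uidNames) :
    whois s = ["no accounts for that user"] := by
  have hfor : whoisFor [s] = none := by
    simp [whoisFor, whoisHelper_nil s h]
  show whoisLoop (63 + 1) [s] = _
  rw [whoisLoop, hfor]
  rfl

set_option maxRecDepth 100000 in
theorem keys_groupsOf : PySem.Dict.keys groupsOf = uidNames := by decide

theorem whois_alt_notin (s : String) (h : s ∉ uidNames) :
    whois_alt s = ["no accounts for that user"] := by
  have hcon : PySem.Dict.contains groupsOf s = false := by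
    rw [PySem.Dict.contains_eq_decide_mem_keys, keys_groupsOf]
    simpa using h
  unfold whois_alt
  simp only [hcon, Bool.false_eq_true, if_false]

-- ===== VERDICT (by name: the statement is the Claim_ definition above) =====
theorem whois_spec : Claim_equal_whois := by
  intro s _
  unfold Spec_whois
  by_cases h : s ∈ uidNames
  · exact whois_eq_on_uidNames s h
  · rw [whois_notin s h, whois_alt_notin s h]
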